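-- pv_equiv track=rewrite | github.com/Kevin-Ziegler/ARG_ML_Simulation_Pipeline | IqtreeProcessFT_InputFile_RF.py | findPolyatomy
-- ===== SOURCE A (Python) =====
-- def findPolyatomy(newick):
-- 	count_comma = 0
-- 	for i in range(0, len(newick)):
-- 		if newick[i]  == "(":
-- 			count_comma = 0
-- 		if newick[i] == ",":
-- 			count_comma +=1
-- 		if newick[i] == ")":
-- 			if count_comma > 1:
-- 				return "Polyatomy"
-- 			count_comma = 0
-- 	return "Not Polyatomy"
-- ===== SOURCE B (Python) =====
-- def findPolyatomy(newick):
--     # Pass 1: split the string at every paren character, keeping the segments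
--     # of text between consecutive parens (and the delimiters themselves).
--     segs = []
--     delims = []
--     cur = []
--     for ch in newick:
--         if ch == '(' or ch == ')':
--             segs.append(''.join(cur))
--             delims.append(ch)
--             cur = []
--         else:
--             cur.append(ch)
--     # Pass 2: a closing paren signals polyatomy iff the segment just before it
--     # contains more than one comma.
--     for i, d in enumerate(delims):
--         if d == ')' and segs[i].count(',') > 1:
--             return 'Polyatomy'
--     return 'Not Polyatomy'
-- ===== Notes on version B (the rewrite author's own statement) =====
-- stated objective: alternative
-- what changed: Replaces A's single-pass counter-with-reset scan by a two-pass split-then-check: the string is first split at every parenthesis into inter-paren segments, then each closing delimiter is tested against the comma count of the segment preceding it via str.count.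
import Mathlib
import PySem

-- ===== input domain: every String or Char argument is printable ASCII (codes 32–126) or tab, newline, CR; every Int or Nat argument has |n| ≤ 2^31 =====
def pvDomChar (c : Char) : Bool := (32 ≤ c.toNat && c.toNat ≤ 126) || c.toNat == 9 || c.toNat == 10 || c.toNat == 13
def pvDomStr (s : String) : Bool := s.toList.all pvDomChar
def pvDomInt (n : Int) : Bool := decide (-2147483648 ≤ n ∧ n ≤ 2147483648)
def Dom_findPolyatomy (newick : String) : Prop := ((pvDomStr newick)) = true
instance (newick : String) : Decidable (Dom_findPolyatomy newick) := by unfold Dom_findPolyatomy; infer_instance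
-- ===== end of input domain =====

-- B replaces A's one-pass counter-with-reset scan by a two-pass split-at-parens
-- then check-segment-before-each-')' decomposition (objective: alternative).


-- ===== PORT A =====
-- A: one pass over the characters, a comma counter reset at every paren,
-- early return "Polyatomy" at a ')' whose counter exceeds 1.
def goA : List Char → Nat → String
  | [], _ => "Not Polyatomy"
  | ch :: rest, c =>
    let c1 := if ch = '(' then 0 else c
    let c2 := if ch = ',' then c1 + 1 else c1
    if ch = ')' then (if c2 > 1 then "Polyatomy" else goA rest 0)
    else goA rest c2

def findPolyatomy (newick : String) : String := goA newick.toList 0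

-- ===== PORT B =====
-- B pass 1: split at every paren char; returns (first segment, list of (delim, following segment)).
def splitParens : List Char → List Char × List (Char × List Char)
  | [] => ([], [])
  | ch :: rest =>
    let r := splitParens rest
    if ch = '(' ∨ ch = ')' then ([], (ch, r.1) :: r.2)
    else (ch :: r.1, r.2)

-- B pass 2: walk the delimiters carrying the segment that precedes each one.
def scanB : List Char → List (Char × List Char) → String
  | _, [] => "Not Polyatomy"
  | prev, (d, seg) :: rest =>
    if d = ')' ∧ prev.count ',' > 1 then "Polyatomy" else scanB seg rest

def findPolyatomy_alt (newick : String) : String :=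
  let r := splitParens newick.toList
  scanB r.1 r.2

-- ===== PRECONDITION & SPEC =====
def Spec_findPolyatomy (newick : String) (out : String) : Prop := out = findPolyatomy_alt newick
instance (newick : String) (out : String) : Decidable (Spec_findPolyatomy newick out) := by unfold Spec_findPolyatomy; infer_instance

-- ===== CLAIM (what is proved, stated in full; the proofs are below) =====
def Claim_equal_findPolyatomy : Prop := ∀ (newick : String), Dom_findPolyatomy newick → Spec_findPolyatomy newick (findPolyatomy newick)

-- ===== LEMMAS AND PROOFS =====

-- scanB only depends on the comma count of the carried segment.
def goBn : Nat → List (Char × List Char) → String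
  | _, [] => "Not Polyatomy"
  | n, (d, seg) :: rest => if d = ')' ∧ n > 1 then "Polyatomy" else goBn (seg.count ',') rest

theorem scanB_eq_goBn : ∀ (ps : List (Char × List Char)) (s : List Char),
    scanB s ps = goBn (s.count ',') ps := by
  intro ps
  induction ps with
  | nil => intro s; rfl
  | cons p rest ih =>
    intro s
    obtain ⟨d, seg⟩ := p
    simp [scanB, goBn, ih]

theorem goA_eq_goBn : ∀ (l : List Char) (c : Nat),
    goA l c = goBn (c + (splitParens l).1.count ',') (splitParens l).2 := by
  intro l
  induction l with
  | nil => intro c; rfl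
  | cons ch rest ih =>
    intro c
    by_cases hp : ch = '('
    · subst hp
      simp [goA, splitParens, goBn, ih]
    · by_cases hc : ch = ')'
      · subst hc
        by_cases h1 : c > 1
        · simp [goA, splitParens, goBn, h1]
        · simp [goA, splitParens, goBn, h1, ih]
      · by_cases hcm : ch = ','
        · subst hcm
          simp [goA, splitParens, hp, hc, ih]
          ring_nf
        · simp [goA, splitParens, hp, hc, hcm, ih]

-- ===== VERDICT (by name: the statement is the Claim_ definition above) =====
theorem findPolyatomy_spec : Claim_equal_findPolyatomy := by
  intro newick _
  unfold Spec_findPolyatomy findPolyatomy findPolyatomy_alt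
  rw [goA_eq_goBn, scanB_eq_goBn]
  simp
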